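-- pv_equiv track=rewrite | github.com/youtao1999/tfim_quantum_spin_analysis | tfim_EE.py | vertical_bipartition
-- ===== SOURCE A (Python) =====
-- def Diff(li1, li2):
--     li_dif = [i for i in li1 + li2 if i not in li1 or i not in li2]
--     return li_dif
--
-- def vertical_bipartition(L):
--     # L[0] is the number of rows, L[1] the number of columns
--     N = L[0] * L[1]
--     A = []
--     mid_line = L[1] // 2
--     A_init_lines = range(mid_line)
--     #     A = [(mid_line + L[1] * i) for i in range(L[0])]
--     for init in A_init_lines:
--         A.append([(init + L[1] * i) for i in range(L[0])])
--     A = [x for sublist in A for x in sublist]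
--
--     complete = [i for i in range(N)]
--     B = Diff(complete, A)
--     return A, B
-- ===== SOURCE B (Python) =====
-- def vertical_bipartition(L):
--     rows, cols = L[0], L[1]
--     mid_line = cols // 2
--     A = [c + cols * r for c in range(mid_line) for r in range(rows)]
--     B = []
--     for row in range(rows):
--         for col in range(mid_line, cols):
--             B.append(row * cols + col)
--     return A, B
-- ===== Notes on version B (the rewrite author's own statement) =====
-- stated objective: alternative
-- what changed: B drops the build-complete-range-then-Diff set-difference decomposition and constructs the complement set directly with a nested row/column loop in the same ascending order; the A side stays column-major.
-- intended difference: On lists whose first two entries are both negative, A returns ([], list(range(L[0]*L[1]))) — the product of two negative sizes is positive, so the leftover complete-range survives the Diff — while B returns ([], []), the intended value since a grid with no rows and no columns has no sites. — e.g. on vertical_bipartition([-1, -1]): A returns ([], [0]), B returns ([], [])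
import Mathlib
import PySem

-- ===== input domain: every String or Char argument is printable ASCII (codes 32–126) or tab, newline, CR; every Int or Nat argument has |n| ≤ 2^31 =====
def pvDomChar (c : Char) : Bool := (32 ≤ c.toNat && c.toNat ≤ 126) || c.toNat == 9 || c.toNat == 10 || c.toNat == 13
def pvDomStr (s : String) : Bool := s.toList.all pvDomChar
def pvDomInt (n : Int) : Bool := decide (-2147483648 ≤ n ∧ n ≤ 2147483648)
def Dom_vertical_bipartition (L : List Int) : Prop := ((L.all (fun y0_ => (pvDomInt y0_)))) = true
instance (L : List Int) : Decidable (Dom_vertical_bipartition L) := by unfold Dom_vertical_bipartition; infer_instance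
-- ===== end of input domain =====

-- B replaces A's build-complete-range-then-Diff set-difference decomposition by a direct
-- nested row/column construction of the complement, in the same ascending order.

-- ===== PORT A =====
-- helper Diff(li1, li2): [i for i in li1 + li2 if i not in li1 or i not in li2]
def pyDiff (li1 li2 : List Int) : List Int :=
  (li1 ++ li2).filter (fun i => !(li1.contains i) || !(li2.contains i))

def vertical_bipartition (L : List Int) : List Int × List Int :=
  let rows := (PySem.List.pyGet? L 0).getD 0   -- L[0]; Pre_ guarantees it exists
  let cols := (PySem.List.pyGet? L 1).getD 0   -- L[1]
  let N := rows * cols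
  let mid_line := PySem.Int.floordiv cols 2
  -- for init in range(mid_line): A.append([init + cols*i for i in range(rows)])
  let Alists := (PySem.List.pyRange 0 mid_line 1).foldl
      (fun acc init => acc ++ [(PySem.List.pyRange 0 rows 1).map (fun i => init + cols * i)]) []
  -- A = [x for sublist in A for x in sublist]
  let A := Alists.flatten
  let complete := PySem.List.pyRange 0 N 1
  let B := pyDiff complete A
  (A, B)

-- ===== PORT B =====
def vertical_bipartition_alt (L : List Int) : List Int × List Int :=
  let rows := (PySem.List.pyGet? L 0).getD 0
  let cols := (PySem.List.pyGet? L 1).getD 0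
  let mid_line := PySem.Int.floordiv cols 2
  -- A = [c + cols*r for c in range(mid_line) for r in range(rows)]
  let A := (PySem.List.pyRange 0 mid_line 1).flatMap
      (fun c => (PySem.List.pyRange 0 rows 1).map (fun r => c + cols * r))
  -- for row in range(rows): for col in range(mid_line, cols): B.append(row*cols + col)
  let B := (PySem.List.pyRange 0 rows 1).foldl
      (fun acc row => (PySem.List.pyRange mid_line cols 1).foldl
        (fun acc2 col => acc2 ++ [row * cols + col]) acc) []
  (A, B)

-- ===== PRECONDITION & SPEC =====
-- Pre_ excludes only lists with fewer than two elements, on which A raises IndexError.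
def Pre_vertical_bipartition (L : List Int) : Prop := 2 ≤ L.length
instance (L : List Int) : Decidable (Pre_vertical_bipartition L) := by unfold Pre_vertical_bipartition; infer_instance
def pvWitness_vertical_bipartition : List Int := [2, 4]

-- On lists whose first two entries are both negative, A returns ([], list(range(L[0]*L[1])))
-- (the product of the two negative sizes is positive, so the whole complete range survives the
-- Diff against the empty A-list), while B returns ([], []), the intended value: a grid with
-- no rows and no columns has no sites.
def D_vertical_bipartition (L : List Int) : Prop :=
  2 ≤ L.length ∧ L.getD 0 0 < 0 ∧ L.getD 1 0 < 0
instance (L : List Int) : Decidable (D_vertical_bipartition L) := by unfold D_vertical_bipartition; infer_instance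

def Spec_vertical_bipartition (L : List Int) (out : List Int × List Int) : Prop :=
  ¬ D_vertical_bipartition L → out = vertical_bipartition_alt L
instance (L : List Int) (out : List Int × List Int) : Decidable (Spec_vertical_bipartition L out) := by unfold Spec_vertical_bipartition; infer_instance

def pvDiffWitness_vertical_bipartition : List Int := [-1, -1]
def pvDiffWitnessOut_vertical_bipartition : (List Int × List Int) × (List Int × List Int) :=
  (([], [0]), ([], []))

-- ===== CLAIM (what is proved, stated in full; the proofs are below) =====
def Claim_unchanged_vertical_bipartition : Prop := ∀ (L : List Int), Dom_vertical_bipartition L → Pre_vertical_bipartition L → Spec_vertical_bipartition L (vertical_bipartition L)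
def Claim_changed_vertical_bipartition : Prop := Dom_vertical_bipartition (pvDiffWitness_vertical_bipartition) ∧ Pre_vertical_bipartition (pvDiffWitness_vertical_bipartition) ∧ D_vertical_bipartition (pvDiffWitness_vertical_bipartition) ∧ vertical_bipartition (pvDiffWitness_vertical_bipartition) = pvDiffWitnessOut_vertical_bipartition.1 ∧ vertical_bipartition_alt (pvDiffWitness_vertical_bipartition) = pvDiffWitnessOut_vertical_bipartition.2 ∧ pvDiffWitnessOut_vertical_bipartition.1 ≠ pvDiffWitnessOut_vertical_bipartition.2
def Claim_exact_vertical_bipartition : Prop := ∀ (L : List Int), Dom_vertical_bipartition L → Pre_vertical_bipartition L → D_vertical_bipartition L → vertical_bipartition L ≠ vertical_bipartition_alt L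

-- ===== LEMMAS AND PROOFS =====

-- filter of an ascending unit range by a lower bound
theorem pv_filter_ge_pyRange (a b m : Int) (ham : a ≤ m) (hmb : m ≤ b) :
    (PySem.List.pyRange a b 1).filter (fun i => decide (m ≤ i)) = PySem.List.pyRange m b 1 := by
  rw [PySem.List.pyRange_one_append a m b ham hmb, List.filter_append]
  have h1 : (PySem.List.pyRange a m 1).filter (fun i => decide (m ≤ i)) = [] := by
    rw [List.filter_eq_nil_iff]
    intro i hi
    have := (PySem.List.mem_pyRange_one).mp hi
    simp; omega
  have h2 : (PySem.List.pyRange m b 1).filter (fun i => decide (m ≤ i)) = PySem.List.pyRange m b 1 := by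
    rw [List.filter_eq_self]
    intro i hi
    have := (PySem.List.mem_pyRange_one).mp hi
    simp; omega
  rw [h1, h2, List.nil_append]

-- one row block of the complement
theorem pv_block (c mid : Int) (h0 : 0 ≤ mid) (hmc : mid ≤ c) (n : Int) :
    (PySem.List.pyRange (n * c) ((n + 1) * c) 1).filter (fun i => decide (mid ≤ i % c)) =
    (PySem.List.pyRange mid c 1).map (fun col => n * c + col) := by
  have hcong : (PySem.List.pyRange (n * c) ((n + 1) * c) 1).filter (fun i => decide (mid ≤ i % c)) =
      (PySem.List.pyRange (n * c) ((n + 1) * c) 1).filter (fun i => decide (n * c + mid ≤ i)) := by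
    apply List.filter_congr
    intro i hi
    have hm := (PySem.List.mem_pyRange_one).mp hi
    have hmod : i % c = i - n * c := by
      have h1 : (i - n * c) % c = i - n * c := by
        apply Int.emod_eq_of_lt <;> nlinarith
      calc i % c = (i - n * c + n * c) % c := by ring_nf
        _ = (i - n * c) % c := by simp
        _ = i - n * c := h1
    simp [hmod]; omega
  rw [hcong, pv_filter_ge_pyRange (n * c) ((n + 1) * c) (n * c + mid) (by nlinarith) (by nlinarith)]
  simp [PySem.List.pyRange_one, List.map_map]
  have : (n + 1) * c - (n * c + mid) = c - mid := by ring
  rw [this]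
  apply List.map_congr_left
  intro k _
  simp; ring

-- main partition lemma: the filtered complete range is the row-major complement
theorem pv_partition (c mid : Int) (hc : 0 < c) (h0 : 0 ≤ mid) (hmc : mid ≤ c) (n : Nat) :
    (PySem.List.pyRange 0 ((n : Int) * c) 1).filter (fun i => decide (mid ≤ i % c)) =
    (PySem.List.pyRange 0 (n : Int) 1).flatMap
      (fun row => (PySem.List.pyRange mid c 1).map (fun col => row * c + col)) := by
  induction n with
  | zero => simp [PySem.List.pyRange_one_eq_nil]
  | succ n ih =>
    have hn0 : (0:Int) ≤ (n:Int) * c := by positivity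
    have hsplit : PySem.List.pyRange 0 ((↑(n+1) : Int) * c) 1 =
        PySem.List.pyRange 0 ((n:Int) * c) 1 ++ PySem.List.pyRange ((n:Int) * c) (((n:Int) + 1) * c) 1 := by
      push_cast
      exact PySem.List.pyRange_one_append 0 ((n:Int)*c) (((n:Int)+1)*c) hn0 (by nlinarith)
    rw [hsplit, List.filter_append, ih, pv_block c mid h0 hmc (n:Int)]
    have hr : PySem.List.pyRange 0 (↑(n+1) : Int) 1 = PySem.List.pyRange 0 (n:Int) 1 ++ [(n:Int)] := by
      push_cast
      exact PySem.List.pyRange_one_succ_right (Int.natCast_nonneg n)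
    rw [hr, List.flatMap_append]
    simp

-- membership characterisation of the column-major A set
theorem pv_memA (r c mid : Int) (hc : 0 < c) (hmc : mid ≤ c) (i : Int) :
    i ∈ (PySem.List.pyRange 0 mid 1).flatMap
        (fun col => (PySem.List.pyRange 0 r 1).map (fun k => col + c * k)) ↔
    0 ≤ i ∧ i < r * c ∧ i % c < mid := by
  simp only [List.mem_flatMap, List.mem_map, PySem.List.mem_pyRange_one]
  constructor
  · rintro ⟨col, ⟨hcol0, hcolm⟩, k, ⟨hk0, hkr⟩, rfl⟩
    have hmod : (col + c * k) % c = col := by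
      rw [Int.add_mul_emod_self_left]
      exact Int.emod_eq_of_lt hcol0 (by omega)
    refine ⟨by nlinarith, by nlinarith, by rw [hmod]; exact hcolm⟩
  · rintro ⟨h0i, hiN, hm⟩
    refine ⟨i % c, ⟨Int.emod_nonneg i (by omega), hm⟩, i / c, ⟨Int.ediv_nonneg h0i (by omega), ?_⟩, ?_⟩
    · exact Int.ediv_lt_of_lt_mul hc (by linarith [Int.mul_comm r c])
    · rw [Int.emod_add_ediv i c]

-- A's Diff of the complete range against the A set is a plain filter by the mod condition
theorem pv_diff (r c mid : Int) (hc : 0 < c) (hmc : mid ≤ c) :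
    pyDiff (PySem.List.pyRange 0 (r * c) 1)
        ((PySem.List.pyRange 0 mid 1).flatMap
          (fun col => (PySem.List.pyRange 0 r 1).map (fun k => col + c * k))) =
    (PySem.List.pyRange 0 (r * c) 1).filter (fun i => decide (mid ≤ i % c)) := by
  set Af := (PySem.List.pyRange 0 mid 1).flatMap
      (fun col => (PySem.List.pyRange 0 r 1).map (fun k => col + c * k)) with hAf
  unfold pyDiff
  rw [List.filter_append]
  have h2 : Af.filter (fun i => !(PySem.List.pyRange 0 (r*c) 1).contains i || !Af.contains i) = [] := by
    rw [List.filter_eq_nil_iff]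
    intro i hi
    have hmem := (pv_memA r c mid hc hmc i).mp hi
    have hin : i ∈ PySem.List.pyRange 0 (r*c) 1 := by
      rw [PySem.List.mem_pyRange_one]; exact ⟨hmem.1, hmem.2.1⟩
    simp [hin, hi]
  have h1 : (PySem.List.pyRange 0 (r*c) 1).filter
        (fun i => !(PySem.List.pyRange 0 (r*c) 1).contains i || !Af.contains i) =
      (PySem.List.pyRange 0 (r*c) 1).filter (fun i => decide (mid ≤ i % c)) := by
    apply List.filter_congr
    intro i hi
    have : (i ∈ Af) ↔ i % c < mid := by
      have hm := (PySem.List.mem_pyRange_one).mp hi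
      rw [pv_memA r c mid hc hmc i]; omega
    simp [hi, this]
    by_cases hle : mid ≤ i % c <;> simp [hle] <;> omega
  rw [h1, h2, List.append_nil]

-- the central equivalence on a two-or-more element list, outside the all-negative region
theorem pv_main (a b : Int) (t : List Int) (hab : 0 ≤ a ∨ 0 ≤ b) :
    vertical_bipartition (a::b::t) = vertical_bipartition_alt (a::b::t) := by
  have hg0 : (PySem.List.pyGet? (a::b::t) 0).getD 0 = a := by
    have h : (0:Int) ≤ (t.length:Int) + 1 := by positivity
    simp [PySem.List.pyGet?, PySem.List.pyIdx?, h]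
  have hg1 : (PySem.List.pyGet? (a::b::t) 1).getD 0 = b := by
    have h : (0:Int) ≤ (t.length:Int) := by positivity
    simp [PySem.List.pyGet?, PySem.List.pyIdx?, h]
  have hfd : PySem.Int.floordiv b 2 = b / 2 := PySem.Int.floordiv_eq_ediv_of_pos (by norm_num)
  simp only [vertical_bipartition, vertical_bipartition_alt, hg0, hg1, hfd,
    PySem.List.foldl_append_singleton_eq_map, PySem.List.foldl_append_eq_flatMap,
    List.nil_append, ← List.flatMap_def]
  by_cases hb : 0 < b
  · by_cases ha : 0 < a
    · have h0m : 0 ≤ b/2 := by omega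
      have hmb : b/2 ≤ b := by omega
      obtain ⟨n, rfl⟩ : ∃ n:Nat, a = (n:Int) := ⟨a.toNat, (Int.toNat_of_nonneg (le_of_lt ha)).symm⟩
      rw [pv_diff _ b (b/2) hb hmb, pv_partition b (b/2) hb h0m hmb n]
    · -- a ≤ 0 and b > 0: no rows, empty A and empty complete range on both sides
      have hra : PySem.List.pyRange 0 a 1 = [] := PySem.List.pyRange_one_eq_nil (by omega)
      have hrN : PySem.List.pyRange 0 (a*b) 1 = [] := PySem.List.pyRange_one_eq_nil (by nlinarith)
      simp [hra, hrN, pyDiff]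
  · -- b ≤ 0: no columns; every range involved is empty
    have hmid : PySem.List.pyRange 0 (b/2) 1 = [] := PySem.List.pyRange_one_eq_nil (by omega)
    have hinner : PySem.List.pyRange (b/2) b 1 = [] := PySem.List.pyRange_one_eq_nil (by omega)
    have hrN : PySem.List.pyRange 0 (a*b) 1 = [] := by
      apply PySem.List.pyRange_one_eq_nil
      rcases hab with h | h
      · nlinarith
      · have hb0 : b = 0 := by omega
        simp [hb0]
    simp [hmid, hinner, hrN, pyDiff]

-- ===== VERDICT (by name: the statement is the Claim_ definition above) =====
theorem vertical_bipartition_spec : Claim_unchanged_vertical_bipartition := by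
  intro L hDom hPre hnD
  obtain ⟨a, b, t, rfl⟩ : ∃ a b t, L = a :: b :: t := by
    match L with
    | a :: b :: t => exact ⟨a, b, t, rfl⟩
    | [] => simp [Pre_vertical_bipartition] at hPre
    | [a] => simp [Pre_vertical_bipartition] at hPre
  have hab : 0 ≤ a ∨ 0 ≤ b := by
    by_contra h
    push_neg at h
    exact hnD ⟨by simp, by simpa using h.1, by simpa using h.2⟩
  exact pv_main a b t hab

theorem vertical_bipartition_changed : Claim_changed_vertical_bipartition := by
  unfold Claim_changed_vertical_bipartition; decide

theorem vertical_bipartition_tight : Claim_exact_vertical_bipartition := by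
  intro L hDom hPre hD
  obtain ⟨a, b, t, rfl⟩ : ∃ a b t, L = a :: b :: t := by
    match L with
    | a :: b :: t => exact ⟨a, b, t, rfl⟩
    | [] => simp [Pre_vertical_bipartition] at hPre
    | [a] => simp [Pre_vertical_bipartition] at hPre
  obtain ⟨-, ha, hb⟩ := hD
  have ha : a < 0 := by simpa using ha
  have hb : b < 0 := by simpa using hb
  have hg0 : (PySem.List.pyGet? (a::b::t) 0).getD 0 = a := by
    have h : (0:Int) ≤ (t.length:Int) + 1 := by positivity
    simp [PySem.List.pyGet?, PySem.List.pyIdx?, h]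
  have hg1 : (PySem.List.pyGet? (a::b::t) 1).getD 0 = b := by
    have h : (0:Int) ≤ (t.length:Int) := by positivity
    simp [PySem.List.pyGet?, PySem.List.pyIdx?, h]
  have hfd : PySem.Int.floordiv b 2 = b / 2 := PySem.Int.floordiv_eq_ediv_of_pos (by norm_num)
  intro heq
  have hsnd := congrArg Prod.snd heq
  have hmid : PySem.List.pyRange 0 (b/2) 1 = [] := PySem.List.pyRange_one_eq_nil (by omega)
  have hrowsA : PySem.List.pyRange 0 a 1 = [] := PySem.List.pyRange_one_eq_nil (by omega)
  have hN : 0 < a * b := by nlinarith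
  simp only [vertical_bipartition, vertical_bipartition_alt, hg0, hg1, hfd, hmid, hrowsA,
    pyDiff, List.foldl_nil, List.flatten_nil, List.append_nil, List.nil_append] at hsnd
  -- hsnd now says the filtered complete range is empty
  have hlen := congrArg List.length hsnd
  simp [PySem.List.length_pyRange_one] at hlen
  omega

-- pvDiffWitnessOut sanity is covered by vertical_bipartition_changed
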